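-- pv_equiv track=rewrite | github.com/goufeng928/finance | LIBRARY/GF_PY3_FUNCTION_CTypes.py | COPY_STRING_DELETE_GIVEN_CHAR_AT_FIRST
-- ===== SOURCE A (Python) =====
-- def COPY_STRING_DELETE_GIVEN_CHAR_AT_FIRST(STRING:str, GIVEN_CHAR:str) -> str:
--
--     STRING_LENGTH:int  = len(STRING)
--     STRING_CHARAC:list = []
--     # ----------------------------------------------
--     LEFT:int = 0
--     RIGH:int = STRING_LENGTH - 1
--     while LEFT <= RIGH:
--         """ Within The Loop Statement. """
--         if (LEFT == 0 and STRING[LEFT] == GIVEN_CHAR):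
--             LEFT = LEFT + 1
--         else:
--             STRING_CHARAC.append(STRING[LEFT])
--             LEFT = LEFT + 1
--     # ----------------------------------------------
--     return str('').join(STRING_CHARAC)
-- ===== SOURCE B (Python) =====
-- def COPY_STRING_DELETE_GIVEN_CHAR_AT_FIRST(STRING: str, GIVEN_CHAR: str) -> str:
--     if STRING and STRING[0] == GIVEN_CHAR:
--         return STRING[1:]
--     return STRING
-- ===== Notes on version B (the rewrite author's own statement) =====
-- stated objective: simpler
-- what changed: Replaces the index-tracking while-loop with per-character list accumulation and join by a single guard (non-empty and first char equals GIVEN_CHAR) plus one slice.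
import Mathlib
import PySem

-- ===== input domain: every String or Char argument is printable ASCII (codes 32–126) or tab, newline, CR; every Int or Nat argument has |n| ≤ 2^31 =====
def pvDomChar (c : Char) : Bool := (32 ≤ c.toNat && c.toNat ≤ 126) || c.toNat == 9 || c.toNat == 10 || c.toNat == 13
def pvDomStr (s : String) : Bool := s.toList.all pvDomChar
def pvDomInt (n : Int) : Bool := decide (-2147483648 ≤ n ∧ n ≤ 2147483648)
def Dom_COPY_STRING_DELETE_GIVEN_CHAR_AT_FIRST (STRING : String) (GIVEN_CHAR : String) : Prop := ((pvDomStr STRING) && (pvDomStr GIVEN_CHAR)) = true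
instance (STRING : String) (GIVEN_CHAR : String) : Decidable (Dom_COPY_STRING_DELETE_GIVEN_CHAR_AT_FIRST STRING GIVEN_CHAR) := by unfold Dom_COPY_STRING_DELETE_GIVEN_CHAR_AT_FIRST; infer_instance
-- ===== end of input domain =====

-- B replaces A's index-tracking while-loop (list accumulation + join) with one guard and a slice; objective: simpler.
-- ===== PORT A =====
-- the while-loop: LEFT walks 0..RIGH over the characters; i is LEFT, acc is STRING_CHARAC
def pvLoopA (g : String) : List Char → Nat → List Char → List Char
  | [], _, acc => acc
  | c :: rest, i, acc =>
      if i = 0 ∧ String.ofList [c] = g then pvLoopA g rest (i + 1) acc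
      else pvLoopA g rest (i + 1) (acc ++ [c])

def COPY_STRING_DELETE_GIVEN_CHAR_AT_FIRST (STRING : String) (GIVEN_CHAR : String) : String :=
  String.ofList (pvLoopA GIVEN_CHAR STRING.toList 0 [])

-- ===== PORT B =====
def COPY_STRING_DELETE_GIVEN_CHAR_AT_FIRST_alt (STRING : String) (GIVEN_CHAR : String) : String :=
  match STRING.toList with
  | [] => STRING
  | c :: rest => if String.ofList [c] = GIVEN_CHAR then String.ofList rest else STRING

-- ===== PRECONDITION & SPEC =====
def Spec_COPY_STRING_DELETE_GIVEN_CHAR_AT_FIRST (STRING : String) (GIVEN_CHAR : String) (out : String) : Prop := out = COPY_STRING_DELETE_GIVEN_CHAR_AT_FIRST_alt STRING GIVEN_CHAR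
instance (STRING : String) (GIVEN_CHAR : String) (out : String) : Decidable (Spec_COPY_STRING_DELETE_GIVEN_CHAR_AT_FIRST STRING GIVEN_CHAR out) := by unfold Spec_COPY_STRING_DELETE_GIVEN_CHAR_AT_FIRST; infer_instance

-- ===== CLAIM (what is proved, stated in full; the proofs are below) =====
def Claim_equal_COPY_STRING_DELETE_GIVEN_CHAR_AT_FIRST : Prop := ∀ (STRING : String) (GIVEN_CHAR : String), Dom_COPY_STRING_DELETE_GIVEN_CHAR_AT_FIRST STRING GIVEN_CHAR → Spec_COPY_STRING_DELETE_GIVEN_CHAR_AT_FIRST STRING GIVEN_CHAR (COPY_STRING_DELETE_GIVEN_CHAR_AT_FIRST STRING GIVEN_CHAR)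

-- ===== LEMMAS AND PROOFS =====
-- once LEFT > 0, A's loop appends every remaining character
theorem pvLoopA_pos (g : String) (cs : List Char) (i : Nat) (acc : List Char) :
    pvLoopA g cs (i + 1) acc = acc ++ cs := by
  induction cs generalizing i acc with
  | nil => simp [pvLoopA]
  | cons c rest ih => simp [pvLoopA, ih]

-- ===== VERDICT (by name: the statement is the Claim_ definition above) =====
theorem COPY_STRING_DELETE_GIVEN_CHAR_AT_FIRST_spec : Claim_equal_COPY_STRING_DELETE_GIVEN_CHAR_AT_FIRST := by
  intro STRING GIVEN_CHAR _
  unfold Spec_COPY_STRING_DELETE_GIVEN_CHAR_AT_FIRST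
  unfold COPY_STRING_DELETE_GIVEN_CHAR_AT_FIRST COPY_STRING_DELETE_GIVEN_CHAR_AT_FIRST_alt
  cases h : STRING.toList with
  | nil => simp [pvLoopA, ← h]
  | cons c rest =>
      simp only [pvLoopA]
      split
      · next hc =>
          rw [if_pos hc.2, pvLoopA_pos]; simp
      · next hc =>
          rw [if_neg (fun he => hc ⟨trivial, he⟩), pvLoopA_pos]
          simp [← h]
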